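-- pv_equiv track=rewrite | github.com/EVanGorkom/chimera_coding_challenges | python/general/practice_test.py | maxRequestInWindow
-- ===== SOURCE A (Python) =====
-- def maxRequestInWindow(timestamp, windowSize):
--     timestamp.sort()
--     left = 0
--     max_requests = 0
--
--     for right in range(len(timestamp)):
--         while timestamp[right] - timestamp[left] >= windowSize:
--             left += 1
--
--         current_window = right - left + 1
--         max_requests = max(max_requests, current_window)
--
--     return max_requests
-- ===== SOURCE B (Python) =====
-- def _bisect_right(a, x, lo, hi):
--     # classic binary search: first index in [lo, hi) whose element is > x
--     while lo < hi:
--         mid = (lo + hi) // 2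
--         if x < a[mid]:
--             hi = mid
--         else:
--             lo = mid + 1
--     return lo
--
--
-- def maxRequestInWindow(timestamp, windowSize):
--     # Sorts the argument in place, like the original; equivalence is about the return value.
--     timestamp.sort()
--     max_requests = 0
--     for right in range(len(timestamp)):
--         left = _bisect_right(timestamp, timestamp[right] - windowSize, 0, right + 1)
--         max_requests = max(max_requests, right - left + 1)
--     return max_requests
-- ===== Notes on version B (the rewrite author's own statement) =====
-- stated objective: alternative
-- what changed: Replaces the stateful two-pointer sliding-window scan with a per-element binary search (bisect_right on the sorted prefix) that recomputes the window's left edge independently for each right index.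
-- crash fix: On a nonempty list with windowSize <= 0, A's while-loop walks left past the end and raises IndexError; B returns 0 (the max of empty windows). — e.g. on maxRequestInWindow([1], 0): A raises IndexError, B returns 0
import Mathlib
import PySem

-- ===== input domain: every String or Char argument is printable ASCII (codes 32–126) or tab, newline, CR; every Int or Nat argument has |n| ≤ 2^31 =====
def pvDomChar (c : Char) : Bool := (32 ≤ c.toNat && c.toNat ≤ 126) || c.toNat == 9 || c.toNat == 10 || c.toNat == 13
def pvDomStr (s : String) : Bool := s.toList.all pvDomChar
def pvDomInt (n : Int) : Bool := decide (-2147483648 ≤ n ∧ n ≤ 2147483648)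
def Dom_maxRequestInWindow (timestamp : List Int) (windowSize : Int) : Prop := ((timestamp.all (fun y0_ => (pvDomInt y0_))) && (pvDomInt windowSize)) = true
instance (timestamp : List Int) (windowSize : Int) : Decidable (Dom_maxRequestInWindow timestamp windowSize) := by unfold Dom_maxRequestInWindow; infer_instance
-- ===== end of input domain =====

-- ===== PORT A =====
-- B changes the algorithm (binary search per element instead of a two-pointer scan), same cost class;
-- both sort the argument in place in Python — the equivalence proved here is about the return value.
-- while timestamp[right] - timestamp[left] >= windowSize: left += 1
-- ('l < ts.length' is a totality guard only: Python raises IndexError past the end, excluded by Pre_)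
def pvWhileA (ts : List Int) (ws tr : Int) (l : Nat) : Nat :=
  if h : l < ts.length ∧ ws ≤ tr - ts.getD l 0 then pvWhileA ts ws tr (l + 1) else l
termination_by ts.length - l
decreasing_by omega

-- for right in range(len(timestamp)): ... max_requests = max(max_requests, right - left + 1)
def pvLoopA (ts : List Int) (ws : Int) : List Nat → Nat → Int → Int
  | [], _, mx => mx
  | r :: rs, l, mx =>
    let l' := pvWhileA ts ws (ts.getD r 0) l
    pvLoopA ts ws rs l' (max mx ((r : Int) - (l' : Int) + 1))

def maxRequestInWindow (timestamp : List Int) (windowSize : Int) : Int :=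
  let s := PySem.List.sorted timestamp (fun x => x) false
  pvLoopA s windowSize (List.range s.length) 0 0

-- ===== PORT B =====
-- _bisect_right(s, x, 0, right+1): PySem.List.bisectRight is the same lo < hi halving loop, and with
-- hi = right+1 it inspects only indices < right+1, so it equals bisectRight on the (right+1)-prefix (exact).
def pvLoopB (s : List Int) (ws : Int) : List Nat → Int → Int
  | [], mx => mx
  | r :: rs, mx =>
    let left := PySem.List.bisectRight (s.take (r + 1)) (s.getD r 0 - ws)
    pvLoopB s ws rs (max mx ((r : Int) - (left : Int) + 1))

def maxRequestInWindow_alt (timestamp : List Int) (windowSize : Int) : Int :=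
  let s := PySem.List.sorted timestamp (fun x => x) false
  pvLoopB s windowSize (List.range s.length) 0

-- ===== PRECONDITION & SPEC =====
-- Pre_ excludes exactly the inputs where A raises: on a nonempty list with windowSize <= 0 the
-- while-loop walks left past the last index and Python raises IndexError.
def Pre_maxRequestInWindow (timestamp : List Int) (windowSize : Int) : Prop :=
  timestamp = [] ∨ 1 ≤ windowSize
instance (timestamp : List Int) (windowSize : Int) : Decidable (Pre_maxRequestInWindow timestamp windowSize) := by unfold Pre_maxRequestInWindow; infer_instance

def pvWitness_maxRequestInWindow : List Int × Int := ([5, 0, 2, 6], 3)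

-- On a nonempty list with windowSize <= 0, A raises IndexError; B returns 0 (no timestamp fits such a window).
def Raises_maxRequestInWindow (timestamp : List Int) (windowSize : Int) : Prop :=
  timestamp ≠ [] ∧ windowSize ≤ 0
instance (timestamp : List Int) (windowSize : Int) : Decidable (Raises_maxRequestInWindow timestamp windowSize) := by unfold Raises_maxRequestInWindow; infer_instance
def pvRaiseWitness_maxRequestInWindow : List Int × Int := ([1], 0)
def pvRaiseWitnessOut_maxRequestInWindow : Int := 0

def Spec_maxRequestInWindow (timestamp : List Int) (windowSize : Int) (out : Int) : Prop := out = maxRequestInWindow_alt timestamp windowSize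
instance (timestamp : List Int) (windowSize : Int) (out : Int) : Decidable (Spec_maxRequestInWindow timestamp windowSize out) := by unfold Spec_maxRequestInWindow; infer_instance

-- ===== CLAIM (what is proved, stated in full; the proofs are below) =====
def Claim_equal_maxRequestInWindow : Prop := ∀ (timestamp : List Int) (windowSize : Int), Dom_maxRequestInWindow timestamp windowSize → Pre_maxRequestInWindow timestamp windowSize → Spec_maxRequestInWindow timestamp windowSize (maxRequestInWindow timestamp windowSize)
def Claim_raises_maxRequestInWindow : Prop := (∀ (timestamp : List Int) (windowSize : Int), Dom_maxRequestInWindow timestamp windowSize → Raises_maxRequestInWindow timestamp windowSize → ¬ Pre_maxRequestInWindow timestamp windowSize) ∧ (Dom_maxRequestInWindow (pvRaiseWitness_maxRequestInWindow.1) (pvRaiseWitness_maxRequestInWindow.2) ∧ Raises_maxRequestInWindow (pvRaiseWitness_maxRequestInWindow.1) (pvRaiseWitness_maxRequestInWindow.2) ∧ maxRequestInWindow_alt (pvRaiseWitness_maxRequestInWindow.1) (pvRaiseWitness_maxRequestInWindow.2) = pvRaiseWitnessOut_maxRequestInWindow)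

-- ===== LEMMAS AND PROOFS =====

-- B's left edge for index r, over the sorted list s
def pvC (s : List Int) (ws : Int) (r : Nat) : Nat :=
  PySem.List.bisectRight (s.take (r + 1)) (s.getD r 0 - ws)

theorem pvTake_pairwise (s : List Int) (k : Nat)
    (hs : s.Pairwise (· ≤ ·)) : (s.take k).Pairwise (· ≤ ·) :=
  hs.sublist (List.take_sublist k s)

theorem pvTake_len (s : List Int) (r : Nat) (hr : r < s.length) :
    (s.take (r + 1)).length = r + 1 := by
  simp [List.length_take]; omega

theorem pvC_lt_prop (s : List Int) (ws : Int) (r j : Nat)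
    (hs : s.Pairwise (· ≤ ·)) (hr : r < s.length) (hjr : j ≤ r) (hj : j < pvC s ws r) :
    s.getD j 0 ≤ s.getD r 0 - ws := by
  have hspec := PySem.List.bisectRight_spec (s.take (r+1)) (s.getD r 0 - ws) (pvTake_pairwise s (r+1) hs)
  have hlen := pvTake_len s r hr
  have hj' : j < (s.take (r+1)).length := by omega
  have := hspec.2.1 j hj' hj
  rw [List.getElem_take] at this
  simpa [List.getElem?_eq_getElem (show j < s.length by omega)] using this

theorem pvC_ge_prop (s : List Int) (ws : Int) (r j : Nat)
    (hs : s.Pairwise (· ≤ ·)) (hr : r < s.length)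
    (h1 : pvC s ws r ≤ j) (h2 : j ≤ r) :
    s.getD r 0 - ws < s.getD j 0 := by
  have hspec := PySem.List.bisectRight_spec (s.take (r+1)) (s.getD r 0 - ws) (pvTake_pairwise s (r+1) hs)
  have hlen := pvTake_len s r hr
  have hj' : j < (s.take (r+1)).length := by omega
  have := hspec.2.2 j hj' h1
  rw [List.getElem_take] at this
  simpa [List.getElem?_eq_getElem (show j < s.length by omega)] using this

theorem pvC_le (s : List Int) (ws : Int) (r : Nat)
    (hs : s.Pairwise (· ≤ ·)) (hws : 1 ≤ ws) (hr : r < s.length) :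
    pvC s ws r ≤ r := by
  by_contra hcon
  have := pvC_lt_prop s ws r r hs hr (Nat.le_refl r) (by omega)
  omega

theorem pvGetD_mono (s : List Int) (i j : Nat) (hs : s.Pairwise (· ≤ ·))
    (hij : i ≤ j) (hj : j < s.length) : s.getD i 0 ≤ s.getD j 0 := by
  rcases Nat.lt_or_eq_of_le hij with hlt | heq
  · have := List.pairwise_iff_getElem.mp hs i j (by omega) hj hlt
    rw [List.getD_eq_getElem s 0 (by omega), List.getD_eq_getElem s 0 hj]
    exact this
  · subst heq; exact le_refl _

theorem pvC_mono (s : List Int) (ws : Int) (r r' : Nat)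
    (hs : s.Pairwise (· ≤ ·)) (hws : 1 ≤ ws)
    (hrr : r ≤ r') (hr' : r' < s.length) :
    pvC s ws r ≤ pvC s ws r' := by
  by_contra hcon
  have hr : r < s.length := by omega
  have hcr := pvC_le s ws r hs hws hr
  have h1 := pvC_lt_prop s ws r (pvC s ws r') hs hr (by omega) (by omega)
  have h2 := pvC_ge_prop s ws r' (pvC s ws r') hs hr' (Nat.le_refl _) (by omega)
  have h3 := pvGetD_mono s r r' hs hrr hr'
  omega

theorem pvWhileA_stop (s : List Int) (ws : Int) (r : Nat)
    (hs : s.Pairwise (· ≤ ·)) (hws : 1 ≤ ws) (hr : r < s.length) :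
    pvWhileA s ws (s.getD r 0) (pvC s ws r) = pvC s ws r := by
  have hcr := pvC_le s ws r hs hws hr
  have h2 := pvC_ge_prop s ws r (pvC s ws r) hs hr (Nat.le_refl _) hcr
  rw [pvWhileA, dif_neg]
  omega

theorem pvWhileA_eq (s : List Int) (ws : Int) (r : Nat)
    (hs : s.Pairwise (· ≤ ·)) (hws : 1 ≤ ws) (hr : r < s.length) :
    ∀ l, l ≤ pvC s ws r → pvWhileA s ws (s.getD r 0) l = pvC s ws r := by
  have key : ∀ k l, pvC s ws r - l ≤ k → l ≤ pvC s ws r →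
      pvWhileA s ws (s.getD r 0) l = pvC s ws r := by
    intro k
    induction k with
    | zero =>
      intro l hk hl
      have : l = pvC s ws r := by omega
      subst this
      exact pvWhileA_stop s ws r hs hws hr
    | succ k ih =>
      intro l hk hl
      rcases Nat.lt_or_eq_of_le hl with hlt | heq
      · have hcr := pvC_le s ws r hs hws hr
        have h1 := pvC_lt_prop s ws r l hs hr (by omega) hlt
        rw [pvWhileA, dif_pos ⟨by omega, by omega⟩]
        exact ih (l + 1) (by omega) (by omega)
      · subst heq; exact pvWhileA_stop s ws r hs hws hr
  intro l hl
  exact key (pvC s ws r - l) l (Nat.le_refl _) hl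

theorem pvLoop_eq (s : List Int) (ws : Int)
    (hs : s.Pairwise (· ≤ ·)) (hws : 1 ≤ ws) :
    ∀ (rs : List Nat) (l : Nat) (mx : Int),
      (∀ r ∈ rs, r < s.length) → rs.Pairwise (· ≤ ·) →
      (∀ r ∈ rs, l ≤ pvC s ws r) →
      pvLoopA s ws rs l mx = pvLoopB s ws rs mx := by
  intro rs
  induction rs with
  | nil => intro l mx _ _ _; rfl
  | cons r rs ih =>
    intro l mx hmem hpw hl
    have hr : r < s.length := hmem r (List.mem_cons_self)
    have hw := pvWhileA_eq s ws r hs hws hr l (hl r (List.mem_cons_self))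
    have hcB : PySem.List.bisectRight (s.take (r + 1)) (s.getD r 0 - ws) = pvC s ws r := rfl
    simp only [pvLoopA, pvLoopB, hw, hcB]
    exact ih (pvC s ws r) _ (fun r' h => hmem r' (List.mem_cons_of_mem _ h))
      (List.pairwise_cons.mp hpw).2
      (fun r' h => pvC_mono s ws r r' hs hws ((List.pairwise_cons.mp hpw).1 r' h)
        (hmem r' (List.mem_cons_of_mem _ h)))

-- ===== VERDICT (by name: the statement is the Claim_ definition above) =====
theorem maxRequestInWindow_spec : Claim_equal_maxRequestInWindow := by
  intro ts ws _ hpre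
  unfold Spec_maxRequestInWindow maxRequestInWindow maxRequestInWindow_alt
  rcases hpre with h | hws
  · subst h; simp [PySem.List.sorted, pvLoopA, pvLoopB]
  · have hs := PySem.List.sorted_pairwise ts (fun x => x)
    exact pvLoop_eq _ ws hs hws _ 0 0 (fun r hr => List.mem_range.mp hr)
      (List.pairwise_lt_range.imp (fun h => Nat.le_of_lt h)) (fun r _ => Nat.zero_le _)

def maxRequestInWindow_raises : Claim_raises_maxRequestInWindow := by
  unfold Claim_raises_maxRequestInWindow
  refine ⟨?_, by decide⟩
  rintro ts ws _ ⟨hne, hle⟩ (h | h)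
  · exact hne h
  · omega
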